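-- pv_equiv track=rewrite | github.com/kiung22/algorithm-problem-solving | Programmers/test/test2.py | solution
-- ===== SOURCE A (Python) =====
-- def solution(arr1, arr2):
--     count = 0
--     for str1 in arr1:
--         open = 0
--         close = 0
--         for s1 in str1:
--             if s1 == '(':
--                 open += 1
--             else:
--                 close += 1
--             if close > open:
--                 break
--         else:
--             for str2 in arr2:
--                 open_ = open
--                 close_ = close
--                 for s2 in str2:
--                     if s2 == '(':
--                         open_ += 1
--                     else:
--                         close_ += 1
--                     if close_ > open_:
--                         break
--                 else:
--                     if open_ == close_:
--                         count += 1
--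
--     return count
-- ===== SOURCE B (Python) =====
-- def solution(arr1, arr2):
--     def stats(s):
--         bal = 0
--         mn = 0
--         for ch in s:
--             bal = bal + 1 if ch == '(' else bal - 1
--             if bal < mn:
--                 mn = bal
--         return bal, mn
--
--     counts = {}
--     for s in arr2:
--         net, mn = stats(s)
--         if net <= mn:
--             counts[-net] = counts.get(-net, 0) + 1
--
--     total = 0
--     for s in arr1:
--         net, mn = stats(s)
--         if mn >= 0:
--             total += counts.get(net, 0)
--     return total
-- ===== Notes on version B (the rewrite author's own statement) =====
-- stated objective: alternative
-- what changed: Instead of rescanning every arr2 string once per arr1 string with break-on-imbalance loops, B computes (net, min-balance) once per string in a single full pass and builds a counter dict over arr2 keyed by -net for strings valid in suffix position, so each arr1 string costs one dict lookup.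
import Mathlib
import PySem

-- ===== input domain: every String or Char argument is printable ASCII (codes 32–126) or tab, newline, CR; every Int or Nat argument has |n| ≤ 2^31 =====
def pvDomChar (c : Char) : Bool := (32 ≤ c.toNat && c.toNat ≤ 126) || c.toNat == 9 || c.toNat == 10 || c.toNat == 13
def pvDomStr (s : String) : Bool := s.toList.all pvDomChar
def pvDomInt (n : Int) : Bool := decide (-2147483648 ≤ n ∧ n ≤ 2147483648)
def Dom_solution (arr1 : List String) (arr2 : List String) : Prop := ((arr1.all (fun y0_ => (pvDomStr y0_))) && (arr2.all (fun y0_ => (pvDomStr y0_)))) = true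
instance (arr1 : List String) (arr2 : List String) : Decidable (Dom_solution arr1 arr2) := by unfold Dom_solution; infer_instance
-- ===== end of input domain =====

-- B replaces A's nested rescan of arr2 per arr1 string by one (net, min-balance) pass per string
-- plus a counter dict over arr2 keyed by -net, so each arr1 string costs one lookup (alternative algorithm).


-- ===== PORT A =====
-- A's inner character loop with 'break': returns (open, close, broke); broke = the loop hit
-- 'close > open' and broke out (the for-else suite then does not run).
def scanA : List Char → Int → Int → Int × Int × Bool
  | [], o, c => (o, c, false)
  | ch :: rest, o, c =>
    let o' := if ch = '(' then o + 1 else o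
    let c' := if ch = '(' then c else c + 1
    if c' > o' then (o', c', true) else scanA rest o' c'

def solution (arr1 : List String) (arr2 : List String) : Int :=
  arr1.foldl (fun count str1 =>
    let r := scanA str1.toList 0 0
    if r.2.2 then count
    else arr2.foldl (fun cnt str2 =>
      let r2 := scanA str2.toList r.1 r.2.1
      if r2.2.2 then cnt
      else if r2.1 = r2.2.1 then cnt + 1 else cnt) count) 0

-- ===== PORT B =====
-- Source B's stats: one full pass computing (final balance, minimum running balance).
def statsB : List Char → Int → Int → Int × Int
  | [], bal, mn => (bal, mn)
  | ch :: rest, bal, mn =>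
    let bal' := if ch = '(' then bal + 1 else bal - 1
    statsB rest bal' (if bal' < mn then bal' else mn)

def countsB (arr2 : List String) : PySem.Dict Int Int :=
  arr2.foldl (fun d s =>
    let st := statsB s.toList 0 0
    if st.1 ≤ st.2 then d.insert (-st.1) (d.getD (-st.1) 0 + 1) else d) PySem.Dict.empty

def solution_alt (arr1 : List String) (arr2 : List String) : Int :=
  let counts := countsB arr2
  arr1.foldl (fun total s =>
    let st := statsB s.toList 0 0
    if 0 ≤ st.2 then total + counts.getD st.1 0 else total) 0

-- ===== PRECONDITION & SPEC =====
def Spec_solution (arr1 : List String) (arr2 : List String) (out : Int) : Prop := out = solution_alt arr1 arr2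
instance (arr1 : List String) (arr2 : List String) (out : Int) : Decidable (Spec_solution arr1 arr2 out) := by unfold Spec_solution; infer_instance

-- ===== CLAIM (what is proved, stated in full; the proofs are below) =====
def Claim_equal_solution : Prop := ∀ (arr1 : List String) (arr2 : List String), Dom_solution arr1 arr2 → Spec_solution arr1 arr2 (solution arr1 arr2)

-- ===== LEMMAS AND PROOFS =====

-- net balance of a string ('(' = +1, anything else = -1)
def netC : List Char → Int
  | [] => 0
  | ch :: r => (if ch = '(' then 1 else -1) + netC r

-- minimum balance over NONEMPTY prefixes (0 for the empty string, a harmless dummy)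
def mnpC : List Char → Int
  | [] => 0
  | ch :: r => (if ch = '(' then 1 else -1) + min 0 (mnpC r)

theorem statsB_spec : ∀ (l : List Char) (b m : Int), m ≤ b →
    statsB l b m = (b + netC l, min m (b + mnpC l)) := by
  intro l
  induction l with
  | nil => intro b m h; simp [statsB, netC, mnpC]; omega
  | cons ch r ih =>
    intro b m h
    simp only [statsB, netC, mnpC]
    by_cases hc : ch = '(' <;>
      · simp only [hc, if_true, if_false]
        rw [ih _ _ (by split <;> omega)]
        simp only [Prod.mk.injEq]
        constructor
        · ring
        · split <;> omega

theorem statsB00 (l : List Char) : statsB l 0 0 = (netC l, min 0 (mnpC l)) := by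
  simpa using statsB_spec l 0 0 le_rfl

theorem scanA_spec : ∀ (l : List Char) (o c : Int), c ≤ o →
    ((scanA l o c).2.2 = true ↔ o - c + mnpC l < 0) ∧
    ((scanA l o c).2.2 = false →
      (scanA l o c).1 - (scanA l o c).2.1 = o - c + netC l) := by
  intro l
  induction l with
  | nil => intro o c h; simp [scanA, netC, mnpC]; omega
  | cons ch r ih =>
    intro o c h
    simp only [scanA, netC, mnpC]
    by_cases hc : ch = '('
    · simp only [hc, reduceIte]
      by_cases hb : c > o + 1
      · simp only [if_pos hb]; constructor
        · simp; omega
        · intro hcontra; simp at hcontra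
      · simp only [if_neg hb]
        obtain ⟨h1, h2⟩ := ih (o + 1) c (by omega)
        refine ⟨?_, ?_⟩
        · rw [h1]; omega
        · intro hnb; rw [h2 hnb]; ring
    · simp only [hc, reduceIte]
      by_cases hb : c + 1 > o
      · simp only [if_pos hb]; constructor
        · simp; omega
        · intro hcontra; simp at hcontra
      · simp only [if_neg hb]
        obtain ⟨h1, h2⟩ := ih o (c + 1) (by omega)
        refine ⟨?_, ?_⟩
        · rw [h1]; omega
        · intro hnb; rw [h2 hnb]; ring

theorem mnp0_le_net : ∀ l : List Char, min 0 (mnpC l) ≤ netC l := by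
  intro l
  induction l with
  | nil => simp [mnpC, netC]
  | cons ch r ih => simp only [mnpC, netC]; omega

-- the counter dict's lookup counts the arr2 strings with matching key and valid suffix shape
theorem countsB_getD (arr2 : List String) (v : Int) :
    (countsB arr2).getD v 0 =
      (arr2.countP (fun s =>
        decide (netC s.toList ≤ min 0 (mnpC s.toList) ∧ -netC s.toList = v)) : Int) := by
  unfold countsB
  simp only [statsB00]
  rw [PySem.List.foldl_ite_eq_foldl_filter]
  rw [← List.foldl_map (f := fun s : String => -netC s.toList)
      (g := fun (d : PySem.Dict Int Int) (k : Int) => d.insert k (d.getD k 0 + 1))]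
  rw [PySem.Dict.getD_foldl_insert_add_one]
  rw [List.count_eq_countP, List.countP_map, List.countP_filter]
  simp only [PySem.Dict.empty, PySem.Dict.getD, PySem.Dict.get?, Function.comp]
  norm_num
  refine List.countP_congr (fun s _ => ?_)
  by_cases h1 : netC s.toList ≤ 0 <;> by_cases h2 : netC s.toList ≤ mnpC s.toList <;>
    by_cases h3 : -netC s.toList = v <;> simp [h1, h2, h3]

-- A's inner loop over arr2, started at (o, c) with c ≤ o, counts the same predicate
theorem innerA_eq (arr2 : List String) (o c : Int) (h : c ≤ o) (count : Int) :
    arr2.foldl (fun cnt str2 =>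
      let r2 := scanA str2.toList o c
      if r2.2.2 then cnt
      else if r2.1 = r2.2.1 then cnt + 1 else cnt) count =
    count + (arr2.countP (fun s =>
      decide (netC s.toList ≤ min 0 (mnpC s.toList) ∧ -netC s.toList = o - c)) : Int) := by
  refine (List.foldl_ext _ (fun (cnt : Int) (str2 : String) =>
      if (netC str2.toList ≤ min 0 (mnpC str2.toList) ∧ -netC str2.toList = o - c)
      then cnt + 1 else cnt) count ?_).trans ?_
  · intro cnt str2 _
    have h2 := scanA_spec str2.toList o c h
    dsimp only
    by_cases hb : (scanA str2.toList o c).2.2 = true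
    · rw [if_pos hb]
      have hlt := h2.1.mp hb
      rw [if_neg (by have := mnp0_le_net str2.toList; omega)]
    · have hb' : (scanA str2.toList o c).2.2 = false := by simpa using hb
      rw [hb']
      simp only [Bool.false_eq_true, if_false]
      have hdiff := h2.2 hb'
      have hge : ¬ (o - c + mnpC str2.toList < 0) := by
        rw [← h2.1]; simp [hb']
      by_cases he : (scanA str2.toList o c).1 = (scanA str2.toList o c).2.1
      · rw [if_pos he, if_pos (by constructor <;> omega)]
      · rw [if_neg he, if_neg (by intro ⟨hc1, hc2⟩; exact he (by omega))]
  · rw [PySem.List.foldl_ite_add_one]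

-- ===== VERDICT (by name: the statement is the Claim_ definition above) =====
theorem solution_spec : Claim_equal_solution := by
  intro arr1 arr2 _
  unfold Spec_solution solution solution_alt
  refine (List.foldl_ext _ (fun (count : Int) (s : String) =>
      if 0 ≤ min 0 (mnpC s.toList)
      then count + (countsB arr2).getD (netC s.toList) 0 else count) 0 ?_).trans ?_
  · intro count str1 _
    have h0 := scanA_spec str1.toList 0 0 le_rfl
    dsimp only
    by_cases hok : 0 ≤ mnpC str1.toList
    · have hnb : (scanA str1.toList 0 0).2.2 = false := by
        by_contra hcon
        rw [Bool.not_eq_false] at hcon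
        exact absurd (h0.1.mp hcon) (by omega)
      have hd : (scanA str1.toList 0 0).1 - (scanA str1.toList 0 0).2.1 = netC str1.toList := by
        have := h0.2 hnb; omega
      have hdpos : 0 ≤ netC str1.toList :=
        le_trans (by omega : (0:Int) ≤ min 0 (mnpC str1.toList)) (mnp0_le_net str1.toList)
      have hco : (scanA str1.toList 0 0).2.1 ≤ (scanA str1.toList 0 0).1 := by omega
      rw [hnb]
      simp only [Bool.false_eq_true, if_false]
      rw [innerA_eq arr2 _ _ hco count, if_pos (by omega), countsB_getD, hd]
    · have hb : (scanA str1.toList 0 0).2.2 = true := h0.1.mpr (by omega)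
      rw [hb, if_pos rfl, if_neg (by omega : ¬ (0:Int) ≤ min 0 (mnpC str1.toList))]
  · simp only [statsB00]
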